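-- pv_equiv track=rewrite | github.com/ByeonSeungHa/Python | Busan Study/60.py | solution
-- ===== SOURCE A (Python) =====
-- def solution(a, b, k):
--     answer = 0
--
--     if a < (3 * b):
--         answer = a // 3
--     else:
--         answer = b
--
--     remain_a = a - 3 * answer
--     remain_b = b - answer
--
--     i = 0
--     k = k - (remain_a + remain_b)
--
--     while k > 0:
--         if i % 4 == 0:
--             answer = answer - 1
--         i = i + 1
--         k = k - 1
--
--     return answer
-- ===== SOURCE B (Python) =====
-- def solution(a, b, k):
--     # Closed form: answer = min(a // 3, b); after subtracting the leftovers
--     # from k, the while loop removes one from answer per 4 remaining units,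
--     # i.e. ceil(k/4) = (k + 3) // 4 when k > 0.
--     answer = min(a // 3, b)
--     k -= (a - 3 * answer) + (b - answer)
--     if k > 0:
--         answer -= (k + 3) // 4
--     return answer
-- ===== Notes on version B (the rewrite author's own statement) =====
-- stated objective: faster
-- what changed: Replaces the O(k) while-loop (decrement answer every 4th iteration) with the closed form answer -= (k+3)//4 when k>0, and the if/else with min(a//3, b).
import Mathlib
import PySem

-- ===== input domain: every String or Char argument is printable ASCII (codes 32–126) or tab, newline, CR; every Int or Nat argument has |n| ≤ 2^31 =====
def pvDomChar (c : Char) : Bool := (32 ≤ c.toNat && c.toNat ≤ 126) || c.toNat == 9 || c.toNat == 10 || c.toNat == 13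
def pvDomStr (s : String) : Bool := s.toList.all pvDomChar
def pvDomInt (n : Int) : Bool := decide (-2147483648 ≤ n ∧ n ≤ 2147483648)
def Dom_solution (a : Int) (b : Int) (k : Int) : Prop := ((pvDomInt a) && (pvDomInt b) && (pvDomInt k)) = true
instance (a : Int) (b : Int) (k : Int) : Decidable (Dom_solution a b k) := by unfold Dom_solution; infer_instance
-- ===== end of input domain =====

-- B replaces A's O(k) adjustment loop with the closed form answer -= (k+3)//4 (objective: faster).

-- ===== PORT A =====
-- the while loop: while k > 0: if i % 4 == 0: answer -= 1; i += 1; k -= 1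
def solutionLoop (answer : Int) (i : Int) (k : Int) : Int :=
  if 0 < k then
    solutionLoop (if PySem.Int.mod i 4 = 0 then answer - 1 else answer) (i + 1) (k - 1)
  else answer
termination_by k.toNat
decreasing_by omega

def solution (a : Int) (b : Int) (k : Int) : Int :=
  let answer : Int := if a < 3 * b then PySem.Int.floordiv a 3 else b
  let remain_a := a - 3 * answer
  let remain_b := b - answer
  solutionLoop answer 0 (k - (remain_a + remain_b))

-- ===== PORT B =====
def solution_alt (a : Int) (b : Int) (k : Int) : Int :=
  let answer : Int := min (PySem.Int.floordiv a 3) b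
  let k' := k - ((a - 3 * answer) + (b - answer))
  if 0 < k' then answer - PySem.Int.floordiv (k' + 3) 4 else answer

-- ===== PRECONDITION & SPEC =====
def Spec_solution (a : Int) (b : Int) (k : Int) (out : Int) : Prop := out = solution_alt a b k
instance (a : Int) (b : Int) (k : Int) (out : Int) : Decidable (Spec_solution a b k out) := by unfold Spec_solution; infer_instance

-- ===== CLAIM (what is proved, stated in full; the proofs are below) =====
def Claim_equal_solution : Prop := ∀ (a : Int) (b : Int) (k : Int), Dom_solution a b k → Spec_solution a b k (solution a b k)

-- ===== LEMMAS AND PROOFS =====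

-- closed form of the loop: it runs k times starting at phase i ≥ 0 and
-- subtracts one per index divisible by 4 in [i, i+k)
theorem solutionLoop_eq (n : Nat) : ∀ (ans i k : Int), 0 ≤ i → k.toNat = n →
    solutionLoop ans i k =
      ans - (if 0 < k then (i % 4 + k + 3) / 4 - (i % 4 + 3) / 4 else 0) := by
  induction n with
  | zero =>
    intro ans i k hi hk
    rw [solutionLoop]
    have : ¬ 0 < k := by omega
    simp [this]
  | succ m ih =>
    intro ans i k hi hk
    rw [solutionLoop]
    by_cases hkpos : 0 < k
    · simp only [hkpos, if_true]
      have hmod : PySem.Int.mod i 4 = i % 4 := PySem.Int.mod_eq_emod_of_pos (by omega)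
      rw [ih _ (i + 1) (k - 1) (by omega) (by omega)]
      split_ifs with h1 h2 h2 <;> simp only [hmod] at h1 <;> omega
    · simp [hkpos]

-- the loop started at phase 0 equals the closed form (k'+3)//4 when 0 < k'
theorem solutionLoop_closed (ans k' : Int) :
    solutionLoop ans 0 k' = if 0 < k' then ans - PySem.Int.floordiv (k' + 3) 4 else ans := by
  rw [solutionLoop_eq k'.toNat ans 0 k' (by omega) rfl]
  have h4 : PySem.Int.floordiv (k' + 3) 4 = (k' + 3) / 4 :=
    PySem.Int.floordiv_eq_ediv_of_pos (by omega)
  split_ifs with h <;> [rw [h4]; skip] <;> omega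

theorem solution_eq_alt (a b k : Int) : solution a b k = solution_alt a b k := by
  unfold solution solution_alt
  have h3 : PySem.Int.floordiv a 3 = a / 3 := PySem.Int.floordiv_eq_ediv_of_pos (by omega)
  have hmin : (if a < 3 * b then PySem.Int.floordiv a 3 else b)
      = min (PySem.Int.floordiv a 3) b := by
    rw [h3]; split_ifs with h <;> rw [eq_comm] <;> omega
  rw [hmin]
  exact solutionLoop_closed _ _

-- ===== VERDICT (by name: the statement is the Claim_ definition above) =====
theorem solution_spec : Claim_equal_solution := by
  intro a b k _
  exact solution_eq_alt a b k
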